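-- pv_equiv track=rewrite | github.com/foshay/Advent-of-Code-2021 | day 3/sol2.py | partO
-- ===== SOURCE A (Python) =====
-- def partO(listx,col):
--     listA = []
--     listB = []
--     for j in listx:
--         if j[col] == '1':
--             listA.append(j)
--         else:
--             listB.append(j)
--     if len(listA) >= len(listB):
--         return listA
--     else:
--         return listB
-- ===== SOURCE B (Python) =====
-- def partO(listx, col):
--     ones = sum(1 for j in listx if j[col] == '1')
--     if ones >= len(listx) - ones:
--         return [j for j in listx if j[col] == '1']
--     else:
--         return [j for j in listx if j[col] != '1']
-- ===== Notes on version B (the rewrite author's own statement) =====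
-- stated objective: simpler
-- what changed: B counts the '1'-column entries in one pass and then builds only the winning group with a single comprehension, instead of appending into two lists and comparing their lengths.
import Mathlib
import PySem

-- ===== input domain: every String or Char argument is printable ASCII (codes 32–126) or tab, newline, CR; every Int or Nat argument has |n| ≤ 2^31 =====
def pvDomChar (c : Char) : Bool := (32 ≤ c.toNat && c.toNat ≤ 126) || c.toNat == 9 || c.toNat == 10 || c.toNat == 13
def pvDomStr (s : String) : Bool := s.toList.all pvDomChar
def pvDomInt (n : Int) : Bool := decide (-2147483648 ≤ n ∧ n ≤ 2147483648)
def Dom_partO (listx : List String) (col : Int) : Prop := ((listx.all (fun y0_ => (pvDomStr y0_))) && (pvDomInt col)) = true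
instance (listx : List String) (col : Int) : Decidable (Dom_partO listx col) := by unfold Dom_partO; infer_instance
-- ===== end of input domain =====

-- B counts the '1'-column entries once and builds only the winning group with one filter; same O(n) cost, simpler shape.

-- ===== PORT A =====
def partO (listx : List String) (col : Int) : List String :=
  let p := listx.foldl
    (fun (acc : List String × List String) j =>
      if PySem.Str.pyGet? j col = some '1' then (acc.1 ++ [j], acc.2)
      else (acc.1, acc.2 ++ [j]))
    ([], [])
  if p.2.length ≤ p.1.length then p.1 else p.2

-- ===== PORT B =====
def partO_alt (listx : List String) (col : Int) : List String :=
  let ones := listx.countP (fun j => PySem.Str.pyGet? j col == some '1')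
  if listx.length - ones ≤ ones then
    listx.filter (fun j => PySem.Str.pyGet? j col == some '1')
  else
    listx.filter (fun j => !(PySem.Str.pyGet? j col == some '1'))

-- ===== PRECONDITION & SPEC =====
-- Pre_: col must be a valid Python index into every string of listx (otherwise A raises IndexError).
def Pre_partO (listx : List String) (col : Int) : Prop :=
  ∀ s ∈ listx, PySem.Raise.InRange s.toList.length col
instance (listx : List String) (col : Int) : Decidable (Pre_partO listx col) := by
  unfold Pre_partO; infer_instance

def pvWitness_partO : List String × Int := (["10", "11", "01"], 1)

def Spec_partO (listx : List String) (col : Int) (out : List String) : Prop := out = partO_alt listx col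
instance (listx : List String) (col : Int) (out : List String) : Decidable (Spec_partO listx col out) := by unfold Spec_partO; infer_instance

-- ===== CLAIM (what is proved, stated in full; the proofs are below) =====
def Claim_equal_partO : Prop := ∀ (listx : List String) (col : Int), Dom_partO listx col → Pre_partO listx col → Spec_partO listx col (partO listx col)

-- ===== LEMMAS AND PROOFS =====

-- A's loop builds exactly the two filters, appended after the accumulators.
theorem partO_loop_eq (listx : List String) (col : Int) (a b : List String) :
    listx.foldl
      (fun (acc : List String × List String) j =>
        if PySem.Str.pyGet? j col = some '1' then (acc.1 ++ [j], acc.2)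
        else (acc.1, acc.2 ++ [j])) (a, b)
    = (a ++ listx.filter (fun j => PySem.Str.pyGet? j col == some '1'),
       b ++ listx.filter (fun j => !(PySem.Str.pyGet? j col == some '1'))) := by
  induction listx generalizing a b with
  | nil => simp
  | cons x xs ih =>
    rw [List.foldl_cons, List.filter_cons, List.filter_cons]
    by_cases h : PySem.Str.pyGet? x col = some '1'
    all_goals
      rw [PySem.Str.pyGet?] at h
      simp only [PySem.Chars.pyGet?_eq_listPyGet?] at h
    · rw [if_pos (by simpa using h), ih]; simp [h]
    · rw [if_neg (by simpa using h), ih]; simp [h]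

-- ===== VERDICT (by name: the statement is the Claim_ definition above) =====
theorem partO_spec : Claim_equal_partO := by
  intro listx col hD hP
  clear hD hP
  unfold Spec_partO partO partO_alt
  rw [partO_loop_eq]
  simp only [List.nil_append]
  have hsum : (listx.filter (fun j => PySem.Str.pyGet? j col == some '1')).length
      + (listx.filter (fun j => !(PySem.Str.pyGet? j col == some '1'))).length
      = listx.length := by
    induction listx with
    | nil => simp
    | cons x xs ih =>
        simp only [PySem.Str.pyGet?, PySem.Chars.pyGet?_eq_listPyGet?] at ih ⊢
        rw [List.filter_cons, List.filter_cons]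
        by_cases h : PySem.List.pyGet? x.toList col = some '1'
        · rw [if_pos (by simp [h]), if_neg (by simp [h])]; simp only [List.length_cons]; omega
        · rw [if_neg (by simp [h]), if_pos (by simp [h])]; simp only [List.length_cons]; omega
  rw [List.countP_eq_length_filter]
  split_ifs with h1 h2 h2 <;> first | rfl | omega
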